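-- pv_equiv track=rewrite | github.com/piotrhelm/NESTFUL | data_v2/executable_functions/py_code_file_4093.py | generate_increasing_sequences
-- ===== SOURCE A (Python) =====
-- from typing import List
--
-- def generate_increasing_sequences(n: int, k: int) -> List[List[int]]:
--
--     """Generates a list of all increasing sequences of length k that are composed of the first n natural numbers.
--
--
--
--     Args:
--
--         n: The number of natural numbers to use.
--
--         k: The length of the sequences.
--
--
--
--     Returns:
--
--         A list of increasing sequences of length k that are composed of the first n natural numbers.
--
--     """
--
--     if k == 1:
--
--         return [[i] for i in range(n, 0, -1)]
--
--
--
--     sequences = []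
--
--     for i in range(n, 0, -1):
--
--         sequences_without_i = generate_increasing_sequences(i - 1, k - 1)
--
--         for sequence in sequences_without_i:
--
--             sequences.append([i] + sequence)
--
--
--
--     return sequences
-- ===== SOURCE B (Python) =====
-- def generate_increasing_sequences(n, k):
--     """Bottom-up DP over sequence length: level j holds, for each m, the sequences of
--     length j drawn from 1..m; only the m-range a later level can need is built, and the
--     top-level list is produced directly from level k-1 (no re-entrant recursion)."""
--     if k <= 0:
--         return []
--     m_max = n if n > 0 else 0
--     if k > m_max:
--         return []
--     prev = [[[]] for _ in range(m_max - k + 1)]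
--     for j in range(1, k):
--         prev = [[[i] + s for i in range(m, 0, -1) for s in prev[i - 1]]
--                 for m in range(m_max - k + j + 1)]
--     return [[i] + s for i in range(m_max, 0, -1) for s in prev[i - 1]]
-- ===== Notes on version B (the rewrite author's own statement) =====
-- stated objective: alternative
-- what changed: Replaced A's re-entrant top-down recursion (which recomputes each subproblem (m, length) once per caller) by a bottom-up dynamic-programming pass over sequence lengths that builds each needed subproblem list exactly once via comprehensions.
import Mathlib
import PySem

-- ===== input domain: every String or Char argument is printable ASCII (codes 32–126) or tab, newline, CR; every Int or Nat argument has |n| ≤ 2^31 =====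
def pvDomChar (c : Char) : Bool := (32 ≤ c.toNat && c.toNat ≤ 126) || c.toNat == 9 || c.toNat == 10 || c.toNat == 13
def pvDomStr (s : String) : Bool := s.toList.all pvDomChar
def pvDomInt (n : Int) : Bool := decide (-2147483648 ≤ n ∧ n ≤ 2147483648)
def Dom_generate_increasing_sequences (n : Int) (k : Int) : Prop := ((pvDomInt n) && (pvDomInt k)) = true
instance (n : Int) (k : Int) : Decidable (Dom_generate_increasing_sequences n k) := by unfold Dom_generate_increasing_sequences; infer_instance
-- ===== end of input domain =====

-- B replaces A's re-entrant recursion by a bottom-up DP table computing each subproblem row once (alternative decomposition, same results on every input).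

-- ===== PORT A =====
def generate_increasing_sequences (n : Int) (k : Int) : List (List Int) :=
  if k = 1 then
    (PySem.List.pyRange n 0 (-1)).map (fun i => [i])
  else
    (PySem.List.pyRange n 0 (-1)).attach.foldl
      (fun sequences x =>
        sequences ++ (generate_increasing_sequences (x.1 - 1) (k - 1)).map (fun s => x.1 :: s))
      []
termination_by n.toNat
decreasing_by
  have h := PySem.List.mem_pyRange_neg_one.mp x.2
  omega

-- ===== PORT B =====
-- helper for B's comprehension '[[i] + s for i in range(m, 0, -1) for s in prev[i - 1]]'
def pvBody (prev : List (List (List Int))) (m : Int) : List (List Int) :=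
  (PySem.List.pyRange m 0 (-1)).flatMap (fun i => (PySem.List.pyGetD prev (i - 1) []).map (fun s => i :: s))

def generate_increasing_sequences_alt (n : Int) (k : Int) : List (List Int) :=
  if k ≤ 0 then []
  else
    let m_max : Int := if n > 0 then n else 0
    if k > m_max then []
    else
      let prev0 : List (List (List Int)) := (PySem.List.pyRange 0 (m_max - k + 1) 1).map (fun _ => [([] : List Int)])
      let prevK : List (List (List Int)) :=
        (PySem.List.pyRange 1 k 1).foldl
          (fun prev j => (PySem.List.pyRange 0 (m_max - k + j + 1) 1).map (fun m => pvBody prev m))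
          prev0
      pvBody prevK m_max

-- ===== PRECONDITION & SPEC =====
-- Pre_ excludes exactly the inputs on which A raises RecursionError: A's very first recursive chain dives
-- to depth n when k <= 0 and to depth min(n, k-1) when k >= 2 before doing any other work, so whenever that
-- depth exceeds CPython's recursion limit A raises at once; k = 1 performs no recursion and is never excluded.
def Pre_generate_increasing_sequences (n : Int) (k : Int) : Prop :=
  k = 1 ∨ (2 ≤ k ∧ (n ≤ 996 ∨ k ≤ 997)) ∨ (k ≤ 0 ∧ n ≤ 996)
instance (n : Int) (k : Int) : Decidable (Pre_generate_increasing_sequences n k) := by unfold Pre_generate_increasing_sequences; infer_instance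
def pvWitness_generate_increasing_sequences : Int × Int := (3, 2)

def Spec_generate_increasing_sequences (n : Int) (k : Int) (out : List (List Int)) : Prop := out = generate_increasing_sequences_alt n k
instance (n : Int) (k : Int) (out : List (List Int)) : Decidable (Spec_generate_increasing_sequences n k out) := by unfold Spec_generate_increasing_sequences; infer_instance

-- ===== CLAIM (what is proved, stated in full; the proofs are below) =====
def Claim_equal_generate_increasing_sequences : Prop := ∀ (n : Int) (k : Int), Dom_generate_increasing_sequences n k → Pre_generate_increasing_sequences n k → Spec_generate_increasing_sequences n k (generate_increasing_sequences n k)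

-- ===== LEMMAS AND PROOFS =====

-- shared mathematical description of the subproblem table: Gp m j = sequences of length j from {1..m}
def Gp : Nat → Nat → List (List Int)
  | _, 0 => [[]]
  | 0, _ + 1 => []
  | m + 1, j + 1 => (Gp m j).map (fun s => ((m : Int) + 1) :: s) ++ Gp m (j + 1)

theorem attach_foldl_append {α β : Type} (l : List α) (f : α → List β) :
    l.attach.foldl (fun acc x => acc ++ f x.1) [] = l.flatMap f := by
  have h1 : l.attach.foldl (fun acc x => acc ++ f x.1) [] =
      (l.attach.map Subtype.val).foldl (fun acc v => acc ++ f v) [] := by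
    rw [List.foldl_map]
  rw [h1, List.attach_map_subtype_val, PySem.List.foldl_append_eq_flatMap, List.nil_append]

theorem gen_nil {n : Int} (k : Int) (hn : n ≤ 0) : generate_increasing_sequences n k = [] := by
  rw [generate_increasing_sequences, PySem.List.pyRange_neg_one_eq_nil hn]
  split <;> simp

theorem gen_flatMap (n k : Int) (hk : k ≠ 1) :
    generate_increasing_sequences n k =
      (PySem.List.pyRange n 0 (-1)).flatMap
        (fun i => (generate_increasing_sequences (i - 1) (k - 1)).map (fun s => i :: s)) := by
  rw [generate_increasing_sequences, if_neg hk,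
    attach_foldl_append (PySem.List.pyRange n 0 (-1))
      (fun i => (generate_increasing_sequences (i - 1) (k - 1)).map (fun s => i :: s))]

theorem gen_nonpos : ∀ (m : Nat) (n k : Int), n.toNat = m → k ≤ 0 → generate_increasing_sequences n k = [] := by
  intro m
  induction m using Nat.strong_induction_on with
  | _ m ih =>
    intro n k hm hk
    rcases (by omega : n ≤ 0 ∨ 0 < n) with hn | hn
    · exact gen_nil k hn
    · rw [gen_flatMap n k (by omega)]
      apply List.flatMap_eq_nil_iff.mpr
      intro i hi
      have hmem := PySem.List.mem_pyRange_neg_one.mp hi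
      rw [ih (i - 1).toNat (by omega) (i - 1) (k - 1) rfl (by omega)]
      rfl

theorem gen_rec (n k : Int) (hn : 0 < n) (hk : k ≠ 1) :
    generate_increasing_sequences n k =
      (generate_increasing_sequences (n - 1) (k - 1)).map (fun s => n :: s) ++
        generate_increasing_sequences (n - 1) k := by
  rw [gen_flatMap n k hk, PySem.List.pyRange_neg_one_cons hn, List.flatMap_cons,
    ← gen_flatMap (n - 1) k hk]

theorem gen_one (n : Int) (hn : 0 < n) :
    generate_increasing_sequences n 1 = [n] :: generate_increasing_sequences (n - 1) 1 := by
  rw [generate_increasing_sequences, if_pos rfl, PySem.List.pyRange_neg_one_cons hn,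
    List.map_cons]
  rw [generate_increasing_sequences, if_pos rfl]

-- A computes Gp
theorem gen_eq_Gp : ∀ (m : Nat) (n k : Int), n.toNat = m → 1 ≤ k →
    generate_increasing_sequences n k = Gp m k.toNat := by
  intro m
  induction m with
  | zero =>
    intro n k hm hk
    rw [gen_nil k (by omega)]
    have : k.toNat = (k.toNat - 1) + 1 := by omega
    rw [this]; rfl
  | succ m ih =>
    intro n k hm hk
    have hn : 0 < n := by omega
    have hnm : (n - 1).toNat = m := by omega
    have hcast : ((m : Int) + 1) = n := by omega
    rcases eq_or_lt_of_le hk with h1 | h2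
    · rw [← h1, gen_one n hn, ih (n - 1) 1 hnm (le_refl 1)]
      show _ = Gp (m + 1) 1
      rw [show Gp (m + 1) 1 = (Gp m 0).map (fun s => ((m : Int) + 1) :: s) ++ Gp m 1 from rfl]
      simp [Gp, hcast]
    · rw [gen_rec n k hn (by omega), ih (n - 1) (k - 1) hnm (by omega), ih (n - 1) k hnm hk]
      have h3 : k.toNat = (k.toNat - 1) + 1 := by omega
      have h4 : (k - 1).toNat = k.toNat - 1 := by omega
      rw [h3, h4]
      show _ = (Gp m (k.toNat - 1)).map (fun s => ((m : Int) + 1) :: s) ++ Gp m (k.toNat - 1 + 1)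
      rw [hcast, ← h3]

theorem push_cast_succ (m : Nat) : ((m + 1 : Nat) : Int) = (m : Int) + 1 := by push_cast; ring

theorem Gp_nil : ∀ (m j : Nat), m < j → Gp m j = [] := by
  intro m
  induction m with
  | zero =>
    intro j hj
    cases j with
    | zero => omega
    | succ j => simp [Gp]
  | succ m ih =>
    intro j hj
    cases j with
    | zero => omega
    | succ j =>
      rw [show Gp (m + 1) (j + 1) = (Gp m j).map (fun s => ((m : Int) + 1) :: s) ++ Gp m (j + 1) from rfl,
        ih j (by omega), ih (j + 1) (by omega)]
      rfl

-- the comprehension computes the next table entry from the previous level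
theorem pvBody_eq (j L : Nat) : ∀ (m : Nat), m ≤ L →
    pvBody ((List.range L).map (fun m => Gp m j)) (m : Int) = Gp m (j + 1) := by
  intro m
  induction m with
  | zero =>
    intro _
    rw [pvBody, PySem.List.pyRange_neg_one_eq_nil (by omega), List.flatMap_nil]
    simp [Gp]
  | succ m ih =>
    intro hm
    rw [pvBody, push_cast_succ m, PySem.List.pyRange_neg_one_cons (by omega), List.flatMap_cons,
      show ((m : Int) + 1 - 1) = ((m : Nat) : Int) by ring, PySem.List.pyGetD_natCast,
      List.getD_eq_getElem _ _ (by simp; omega), List.getElem_map]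
    have htail : (PySem.List.pyRange ((m : Nat) : Int) 0 (-1)).flatMap
        (fun i => (PySem.List.pyGetD ((List.range L).map (fun m => Gp m j)) (i - 1) []).map (fun s => i :: s)) =
        Gp m (j + 1) := by
      rw [← pvBody, ih (by omega)]
    rw [htail]
    simp [List.getElem_range, Gp]

-- the level-j loop: after processing loop values 1..t, prev holds Gp · t for m = 0 .. N-K+t
theorem level_fold (N K : Nat) (hKN : K ≤ N) : ∀ (t : Nat), t + 1 ≤ K →
    (PySem.List.pyRange 1 ((t : Int) + 1) 1).foldl
      (fun prev j => (PySem.List.pyRange 0 ((N : Int) - (K : Int) + j + 1) 1).map (fun m => pvBody prev m))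
      ((PySem.List.pyRange 0 ((N : Int) - (K : Int) + 1) 1).map (fun _ => [([] : List Int)])) =
    (List.range (N - K + t + 1)).map (fun m => Gp m t) := by
  intro t
  induction t with
  | zero =>
    intro _
    rw [show (((0 : Nat) : Int) + 1) = 1 by simp,
      PySem.List.pyRange_one_eq_nil (a := 1) (b := 1) (by omega), List.foldl_nil,
      PySem.List.pyRange_one]
    rw [show (((N : Int) - (K : Int) + 1) - 0).toNat = N - K + 0 + 1 by omega, List.map_map]
    apply List.map_congr_left
    intro m _
    simp [Gp]
  | succ t ih =>
    intro ht
    rw [push_cast_succ t, PySem.List.pyRange_one_succ_right (a := 1) (b := (t : Int) + 1) (by omega),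
      List.foldl_append, ih (by omega), List.foldl_cons, List.foldl_nil, PySem.List.pyRange_one]
    rw [show (((N : Int) - (K : Int) + ((t : Int) + 1) + 1) - 0).toNat = N - K + (t + 1) + 1 by omega,
      List.map_map]
    apply List.map_congr_left
    intro m hm
    have hm' : m ≤ N - K + t + 1 := by
      have := List.mem_range.mp hm
      omega
    have := pvBody_eq t (N - K + t + 1) m hm'
    simpa using this

theorem alt_nonpos (n k : Int) (hk : k ≤ 0) : generate_increasing_sequences_alt n k = [] := by
  rw [generate_increasing_sequences_alt, if_pos hk]

theorem alt_big (n k : Int) (h1 : 1 ≤ k) (hbig : (if n > 0 then n else 0) < k) :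
    generate_increasing_sequences_alt n k = [] := by
  rw [generate_increasing_sequences_alt, if_neg (by omega)]
  rw [if_pos hbig]

-- B computes Gp
theorem alt_eq_Gp (n k : Int) (h1 : 1 ≤ k) (hle : k ≤ (if n > 0 then n else 0)) :
    generate_increasing_sequences_alt n k = Gp n.toNat k.toNat := by
  have hn0 : 0 < n := by by_cases h : n > 0 <;> simp [h] at hle <;> omega
  have hmax : (if n > 0 then n else 0) = ((n.toNat : Nat) : Int) := by split <;> omega
  have hkc : k = ((k.toNat : Nat) : Int) := by omega
  rw [generate_increasing_sequences_alt, if_neg (by omega)]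
  simp only [hmax]
  rw [if_neg (by omega)]
  set N := n.toNat with hN
  set K := k.toNat with hKdef
  have hKN : K ≤ N := by omega
  have hrun : PySem.List.pyRange 1 k 1 = PySem.List.pyRange 1 (((K - 1 : Nat) : Int) + 1) 1 := by
    congr 1
    omega
  have harith : ∀ j : Int, (N : Int) - k + j + 1 = (N : Int) - (K : Int) + j + 1 := by
    intro j; omega
  have hprev0 : (N : Int) - k + 1 = (N : Int) - (K : Int) + 1 := by omega
  rw [hprev0, hrun]
  have hbodies : (fun (prev : List (List (List Int))) (j : Int) =>
        (PySem.List.pyRange 0 ((N : Int) - k + j + 1) 1).map (fun m => pvBody prev m)) =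
      (fun (prev : List (List (List Int))) (j : Int) =>
        (PySem.List.pyRange 0 ((N : Int) - (K : Int) + j + 1) 1).map (fun m => pvBody prev m)) := by
    funext prev j
    rw [harith j]
  rw [hbodies, level_fold N K hKN (K - 1) (by omega)]
  have hrange : N - K + (K - 1) + 1 = N := by omega
  rw [hrange]
  have := pvBody_eq (K - 1) N N (le_refl N)
  rw [show ((N : Nat) : Int) = ((N : Nat) : Int) from rfl] at this
  rw [this]
  congr 1
  omega

-- ===== VERDICT (by name: the statement is the Claim_ definition above) =====
theorem generate_increasing_sequences_spec : Claim_equal_generate_increasing_sequences := by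
  intro n k _ _
  unfold Spec_generate_increasing_sequences
  rcases (by omega : k ≤ 0 ∨ 0 < k) with hk | hk
  · rw [alt_nonpos n k hk, gen_nonpos n.toNat n k rfl hk]
  · rw [gen_eq_Gp n.toNat n k rfl (by omega)]
    rcases (by omega : k ≤ (if n > 0 then n else 0) ∨ (if n > 0 then n else 0) < k) with hle | hbig
    · rw [alt_eq_Gp n k (by omega) hle]
    · rw [alt_big n k (by omega) hbig, Gp_nil n.toNat k.toNat (by split at hbig <;> omega)]
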